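-- pv_equiv track=rewrite | github.com/softwareandgineer/softwareandgineer | CCCJ2/CCCJ200_9966.py | is_rotatable
-- ===== SOURCE A (Python) =====
-- def is_rotatable(lst):
--     i = 0
--     j = len(lst) - 1
--
--     still_good = True
--     while i <= j:
--         if lst[i] == lst[j] == 0 or lst[i] == lst[j] == 1 or lst[i] == lst[j] == 8 or (lst[i] == 6 and lst[j] == 9) or (
--                 lst[i] == 9 and lst[j] == 6):
--             i += 1
--             j -= 1
--         else:
--             still_good = False
--             break
--
--     return still_good
-- ===== SOURCE B (Python) =====
-- def is_rotatable(lst):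
--     rot = {0: 0, 1: 1, 8: 8, 6: 9, 9: 6}
--     if any(d not in rot for d in lst):
--         return False
--     return [rot[d] for d in reversed(lst)] == lst
-- ===== Notes on version B (the rewrite author's own statement) =====
-- stated objective: alternative
-- what changed: Replaces A's two-pointer while loop with flag/break and chained equality tests by staged passes: validate every digit against a rotation table, then construct the 180-degree-rotated list ([rot[d] for d in reversed(lst)]) and compare it to the original by whole-list equality.
import Mathlib
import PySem

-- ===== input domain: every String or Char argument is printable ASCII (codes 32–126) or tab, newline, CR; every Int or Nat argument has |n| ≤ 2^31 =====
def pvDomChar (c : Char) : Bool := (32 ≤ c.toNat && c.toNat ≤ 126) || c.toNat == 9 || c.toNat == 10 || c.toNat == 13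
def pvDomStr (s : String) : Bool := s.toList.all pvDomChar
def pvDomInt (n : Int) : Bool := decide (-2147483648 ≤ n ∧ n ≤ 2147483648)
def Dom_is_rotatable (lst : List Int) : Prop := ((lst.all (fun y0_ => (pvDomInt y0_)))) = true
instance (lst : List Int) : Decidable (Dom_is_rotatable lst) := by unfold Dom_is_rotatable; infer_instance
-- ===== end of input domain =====

-- B replaces A's two-pointer while loop (flag + chained equality tests) by staged passes:
-- validate every digit against a rotation table, then build the 180-degree-rotated list and
-- compare it to the original by whole-list equality; objective: alternative, same cost.


-- ===== PORT A =====
-- the while loop: pointers i, j; `still_good = False; break` becomes returning false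
def isRotLoop (lst : List Int) (i j : Int) : Bool :=
  if i ≤ j then
    let a := PySem.List.pyGetD lst i 0   -- lst[i]: always in range on reachable states (0 ≤ i ≤ j < len)
    let b := PySem.List.pyGetD lst j 0
    if (a == 0 && b == 0) || (a == 1 && b == 1) || (a == 8 && b == 8) ||
       (a == 6 && b == 9) || (a == 9 && b == 6) then
      isRotLoop lst (i + 1) (j - 1)
    else false
  else true
termination_by (j - i + 1).toNat
decreasing_by simp_wf; omega

def is_rotatable (lst : List Int) : Bool :=
  isRotLoop lst 0 ((lst.length : Int) - 1)

-- ===== PORT B =====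
-- rot = {0: 0, 1: 1, 8: 8, 6: 9, 9: 6}
def rotTable : PySem.Dict Int Int :=
  PySem.Dict.ofList [(0, 0), (1, 1), (8, 8), (6, 9), (9, 6)]

-- if any(d not in rot for d in lst): return False
-- return [rot[d] for d in reversed(lst)] == lst
-- (rot[d] is ported as getD with default 0: the guard above guarantees the key is present,
--  so no KeyError can occur and the default is never used)
def is_rotatable_alt (lst : List Int) : Bool :=
  if lst.any (fun d => !(PySem.Dict.contains rotTable d)) then false
  else lst.reverse.map (fun d => PySem.Dict.getD rotTable d 0) == lst

-- ===== PRECONDITION & SPEC =====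
def Spec_is_rotatable (lst : List Int) (out : Bool) : Prop := out = is_rotatable_alt lst
instance (lst : List Int) (out : Bool) : Decidable (Spec_is_rotatable lst out) := by unfold Spec_is_rotatable; infer_instance

-- ===== CLAIM (what is proved, stated in full; the proofs are below) =====
def Claim_equal_is_rotatable : Prop := ∀ (lst : List Int), Dom_is_rotatable lst → Spec_is_rotatable lst (is_rotatable lst)

-- ===== LEMMAS AND PROOFS =====

-- the pair condition A tests, as a Boolean predicate
def rotPair (a b : Int) : Bool :=
  decide ((a = 0 ∧ b = 0) ∨ (a = 1 ∧ b = 1) ∨ (a = 8 ∧ b = 8) ∨ (a = 6 ∧ b = 9) ∨ (a = 9 ∧ b = 6))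

lemma rotPair_comm (a b : Int) : rotPair a b = rotPair b a := by
  simp only [rotPair, decide_eq_decide]; omega

lemma get?_rotTable_eq (a : Int) :
    PySem.Dict.get? rotTable a =
      if a = 0 then some 0 else if a = 1 then some 1 else if a = 8 then some 8
      else if a = 6 then some 9 else if a = 9 then some 6 else none := by
  have h : rotTable = PySem.Dict.mk [(0,0),(1,1),(8,8),(6,9),(9,6)] := by decide
  rw [h]
  simp only [PySem.Dict.get?_mk_cons, beq_iff_eq]
  simp [PySem.Dict.get?, eq_comm]

lemma contains_rotTable (a : Int) :
    PySem.Dict.contains rotTable a = decide (a = 0 ∨ a = 1 ∨ a = 8 ∨ a = 6 ∨ a = 9) := by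
  rw [PySem.Dict.contains_eq_isSome_get?, get?_rotTable_eq]
  split_ifs with h0 h1 h8 h6 h9 <;> simp_all

lemma getD_rotTable (a b : Int) (hv : a = 0 ∨ a = 1 ∨ a = 8 ∨ a = 6 ∨ a = 9) :
    (PySem.Dict.getD rotTable a 0 = b) ↔ rotPair a b = true := by
  rw [PySem.Dict.getD_eq_get?_getD, get?_rotTable_eq]
  rcases hv with h|h|h|h|h <;> subst h <;> simp [rotPair] <;> omega

lemma rotPair_valid_left (a b : Int) (h : rotPair a b = true) :
    a = 0 ∨ a = 1 ∨ a = 8 ∨ a = 6 ∨ a = 9 := by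
  simp only [rotPair, decide_eq_true_eq] at h; omega

lemma condA_eq (a b : Int) :
    ((a == 0 && b == 0) || (a == 1 && b == 1) || (a == 8 && b == 8) ||
     (a == 6 && b == 9) || (a == 9 && b == 6)) = rotPair a b := by
  unfold rotPair
  by_cases h : ((a = 0 ∧ b = 0) ∨ (a = 1 ∧ b = 1) ∨ (a = 8 ∧ b = 8) ∨ (a = 6 ∧ b = 9) ∨ (a = 9 ∧ b = 6))
  · simp only [h, decide_true]
    rcases h with ⟨h1,h2⟩|⟨h1,h2⟩|⟨h1,h2⟩|⟨h1,h2⟩|⟨h1,h2⟩ <;> subst h1 <;> subst h2 <;> decide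
  · simp only [h, decide_false]
    push Not at h
    simp_all

lemma isRotLoop_eq (lst : List Int) :
    ∀ (n : Nat) (i j : Int), (j - i + 1).toNat = n → 0 ≤ i →
      i + j = (lst.length : Int) - 1 →
    isRotLoop lst i j =
      decide (∀ k : Nat, k < lst.length → i ≤ (k : Int) → (k : Int) ≤ j →
        rotPair (lst.getD k 0) (lst.getD (lst.length - 1 - k) 0) = true) := by
  intro n
  induction n using Nat.strong_induction_on with
  | _ n ih =>
    intro i j hn hi hsum
    rw [isRotLoop]
    by_cases hij : i ≤ j
    · rw [if_pos hij]
      have hjlt : j < (lst.length : Int) := by omega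
      have hj0 : 0 ≤ j := by omega
      have hib : PySem.List.pyGetD lst i 0 = lst.getD i.toNat 0 :=
        PySem.List.pyGetD_of_nonneg lst 0 hi
      have hjb : PySem.List.pyGetD lst j 0 = lst.getD j.toNat 0 :=
        PySem.List.pyGetD_of_nonneg lst 0 hj0
      simp only [hib, hjb, condA_eq]
      have hjt : j.toNat = lst.length - 1 - i.toNat := by omega
      by_cases hp : rotPair (lst.getD i.toNat 0) (lst.getD j.toNat 0) = true
      · rw [if_pos hp,
          ih (j - 1 - (i + 1) + 1).toNat (by omega) (i+1) (j-1) rfl (by omega) (by omega)]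
        simp only [decide_eq_decide]
        constructor
        · intro h k hk hik hkj
          by_cases hki : (k : Int) = i
          · have : k = i.toNat := by omega
            subst this
            rwa [← hjt]
          · by_cases hkj' : (k : Int) = j
            · have hk' : k = j.toNat := by omega
              subst hk'
              have h2 : lst.length - 1 - j.toNat = i.toNat := by omega
              rw [h2, rotPair_comm]
              exact hp
            · exact h k hk (by omega) (by omega)
        · intro h k hk hik hkj
          exact h k hk (by omega) (by omega)
      · rw [if_neg hp]
        symm
        simp only [decide_eq_false_iff_not]
        intro hall
        exact hp (by rw [hjt]; exact hall i.toNat (by omega) (by omega) (by omega))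
    · rw [if_neg hij]
      symm
      simp only [decide_eq_true_eq]
      intro k hk hik hkj
      omega

lemma alt_eq (lst : List Int) :
    is_rotatable_alt lst =
      decide (∀ k : Nat, k < lst.length →
        rotPair (lst.getD k 0) (lst.getD (lst.length - 1 - k) 0) = true) := by
  unfold is_rotatable_alt
  by_cases hbad : lst.any (fun d => !(PySem.Dict.contains rotTable d)) = true
  · rw [if_pos hbad]
    simp only [List.any_eq_true, Bool.not_eq_eq_eq_not, Bool.not_true] at hbad
    obtain ⟨d, hd, hdc⟩ := hbad
    obtain ⟨k, hk, hdk⟩ := List.mem_iff_getElem.mp hd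
    symm
    simp only [decide_eq_false_iff_not]
    intro hall
    have := hall k hk
    have hv := rotPair_valid_left _ _ this
    rw [List.getD_eq_getElem lst 0 hk, hdk] at hv
    rw [contains_rotTable] at hdc
    simp only [decide_eq_false_iff_not] at hdc
    exact hdc hv
  · rw [if_neg hbad]
    simp only [List.any_eq_true, not_exists, not_and, Bool.not_eq_eq_eq_not, Bool.not_true,
      Bool.not_eq_false] at hbad
    rw [Bool.eq_iff_iff, beq_iff_eq]
    simp only [decide_eq_true_eq]
    have hlen : (lst.reverse.map (fun d => PySem.Dict.getD rotTable d 0)).length = lst.length := by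
      simp
    constructor
    · intro heq k hk
      have hk' : lst.length - 1 - k < lst.length := by omega
      have : (lst.reverse.map (fun d => PySem.Dict.getD rotTable d 0))[k]'(by omega) =
          lst[k]'hk := List.getElem_of_eq heq (by omega)
      simp only [List.getElem_map, List.getElem_reverse] at this
      rw [List.getD_eq_getElem lst 0 hk, List.getD_eq_getElem lst 0 hk']
      have hv : lst[lst.length - 1 - k]'hk' = 0 ∨ lst[lst.length - 1 - k]'hk' = 1 ∨
          lst[lst.length - 1 - k]'hk' = 8 ∨ lst[lst.length - 1 - k]'hk' = 6 ∨
          lst[lst.length - 1 - k]'hk' = 9 := by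
        have hc := hbad _ (List.getElem_mem hk')
        rw [contains_rotTable] at hc
        simpa using hc
      rw [rotPair_comm]
      exact (getD_rotTable _ _ hv).mp this
    · intro h
      apply List.ext_getElem hlen
      intro k hk1 hk2
      have hk' : lst.length - 1 - k < lst.length := by omega
      simp only [List.getElem_map, List.getElem_reverse]
      have hv : lst[lst.length - 1 - k]'hk' = 0 ∨ lst[lst.length - 1 - k]'hk' = 1 ∨
          lst[lst.length - 1 - k]'hk' = 8 ∨ lst[lst.length - 1 - k]'hk' = 6 ∨
          lst[lst.length - 1 - k]'hk' = 9 := by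
        have hc := hbad _ (List.getElem_mem hk')
        rw [contains_rotTable] at hc
        simpa using hc
      apply (getD_rotTable _ _ hv).mpr
      have := h k hk2
      rw [List.getD_eq_getElem lst 0 hk2, List.getD_eq_getElem lst 0 hk'] at this
      rw [rotPair_comm]
      exact this

-- ===== VERDICT (by name: the statement is the Claim_ definition above) =====
theorem is_rotatable_spec : Claim_equal_is_rotatable := by
  intro lst _
  unfold Spec_is_rotatable is_rotatable
  rw [isRotLoop_eq lst ((lst.length:Int) - 1 - 0 + 1).toNat 0 ((lst.length:Int)-1) rfl le_rfl (by omega), alt_eq]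
  simp only [decide_eq_decide]
  constructor
  · intro h k hk
    by_cases hhalf : k ≤ lst.length - 1 - k
    · exact h k hk (by omega) (by omega)
    · have := h (lst.length - 1 - k) (by omega) (by omega) (by omega)
      have heq : lst.length - 1 - (lst.length - 1 - k) = k := by omega
      rw [heq, rotPair_comm] at this
      exact this
  · intro h k hk _ _
    exact h k hk
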